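-- pv_equiv track=rewrite | github.com/zb2313/FedQSN | code/result_manager.py | find_min_element_index
-- ===== SOURCE A (Python) =====
-- def find_min_element_index(arr):
--     min_value = float('inf')  # 初始设定一个无穷大的值作为最小值
--     min_index = (-1, -1)  # 初始设定一个无效的下标
--
--     # 遍历二维数组
--     for i in range(len(arr)):
--         for j in range(len(arr[0])):
--             if arr[i][j] != -1 and arr[i][j] < min_value:
--                 min_value = arr[i][j]
--                 min_index = (i, j)
--
--     return min_index
-- ===== SOURCE B (Python) =====
-- def find_min_element_index(arr):
--     # Two staged passes: first compute the minimum valid value, then locate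
--     # its first occurrence in row-major order (only the first len(arr[0]) columns count).
--     w = len(arr[0]) if arr else 0
--     vals = [v for row in arr for v in row[:w] if v != -1]
--     m = min(vals) if vals else None
--     for i, row in enumerate(arr):
--         if m in row[:w]:
--             return (i, row[:w].index(m))
--     return (-1, -1)
-- ===== Notes on version B (the rewrite author's own statement) =====
-- stated objective: alternative
-- what changed: Replaces A's single sweep carrying a running minimum (infinity sentinel) and best index by two staged passes: pass 1 computes the minimum valid value of the first len(arr[0]) columns, pass 2 scans the rows and returns the position of its first occurrence via membership test and list.index.
import Mathlib
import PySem

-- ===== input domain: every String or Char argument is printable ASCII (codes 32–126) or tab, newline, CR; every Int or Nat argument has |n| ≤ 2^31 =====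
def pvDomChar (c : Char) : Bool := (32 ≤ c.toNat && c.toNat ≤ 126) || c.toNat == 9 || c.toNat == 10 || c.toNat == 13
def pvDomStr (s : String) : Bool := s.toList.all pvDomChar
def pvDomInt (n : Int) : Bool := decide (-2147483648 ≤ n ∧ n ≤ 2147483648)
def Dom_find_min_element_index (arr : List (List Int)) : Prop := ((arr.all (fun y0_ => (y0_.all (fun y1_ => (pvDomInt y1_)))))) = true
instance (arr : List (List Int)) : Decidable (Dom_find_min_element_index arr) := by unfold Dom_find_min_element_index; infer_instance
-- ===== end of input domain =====

-- B replaces A's single running-minimum sweep (infinity sentinel, running best index) by two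
-- staged passes: first compute the minimum valid value, then locate its first occurrence.
-- Objective: alternative decomposition, same asymptotic cost. float('inf') is rendered as none.

-- ===== PORT A =====
def find_min_element_index (arr : List (List Int)) : Int × Int :=
  ((PySem.List.pyRange 0 (arr.length : Int) 1).foldl (fun st i =>
      (PySem.List.pyRange 0 ((PySem.List.pyGetD arr 0 []).length : Int) 1).foldl (fun st j =>
        let v := PySem.List.pyGetD (PySem.List.pyGetD arr i []) j 0
        if v != -1 && st.1.elim true (fun m => decide (v < m)) then (some v, (i, j)) else st) st)
      ((none : Option Int), ((-1 : Int), (-1 : Int)))).2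

-- ===== PORT B =====
-- B's search loop with early return: scan enumerate(arr); on the first row whose first-w slice
-- contains m, return (i, slice.index(m)); fall through to (-1, -1).
def pvLocate (w : Int) (m? : Option Int) : List (Int × List Int) → Int × Int
  | [] => (-1, -1)
  | (i, row) :: rest =>
    match m? with
    | some m =>
      let s := PySem.List.slice row none (some w)
      if m ∈ s then (i, ((PySem.List.index? s m).getD 0 : Int)) else pvLocate w (some m) rest
    | none => pvLocate w none rest

def find_min_element_index_alt (arr : List (List Int)) : Int × Int :=
  let w : Int := if arr = [] then 0 else ((PySem.List.pyGetD arr 0 []).length : Int)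
  let vals := arr.flatMap (fun row => (PySem.List.slice row none (some w)).filter (fun v => v != -1))
  let m? : Option Int := if vals = [] then none else PySem.List.min? vals (fun v => v)
  pvLocate w m? (PySem.List.enumerate arr 0)

-- ===== PRECONDITION & SPEC =====
-- Pre_ excludes ragged arrays with a row shorter than row 0: there Python A raises IndexError.
def Pre_find_min_element_index (arr : List (List Int)) : Prop :=
  ∀ row ∈ arr, (PySem.List.pyGetD arr 0 ([] : List Int)).length ≤ row.length
instance (arr : List (List Int)) : Decidable (Pre_find_min_element_index arr) := by
  unfold Pre_find_min_element_index; infer_instance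
def pvWitness_find_min_element_index : List (List Int) := [[3, -1], [2, 5]]

def Spec_find_min_element_index (arr : List (List Int)) (out : Int × Int) : Prop := out = find_min_element_index_alt arr
instance (arr : List (List Int)) (out : Int × Int) : Decidable (Spec_find_min_element_index arr out) := by unfold Spec_find_min_element_index; infer_instance

-- ===== CLAIM (what is proved, stated in full; the proofs are below) =====
def Claim_equal_find_min_element_index : Prop := ∀ (arr : List (List Int)), Dom_find_min_element_index arr → Pre_find_min_element_index arr → Spec_find_min_element_index arr (find_min_element_index arr)

-- ===== LEMMAS AND PROOFS =====

-- A's loop state (min_value as Option Int, min_index) as a function of a first-minimum candidate.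
def pvRepr (k : Int × Int → Int) : Option (Int × Int) → Option Int × (Int × Int)
  | none => (none, (-1, -1))
  | some m => (some (k m), m)

-- the first-minimum step of PySem.List.min?, as a named function
def pvStep (k : Int × Int → Int) (a : Option (Int × Int)) (p : Int × Int) : Option (Int × Int) :=
  match a with
  | none => some p
  | some m => if k p < k m then some p else some m

lemma pvMinFold (k : Int × Int → Int) (xs : List (Int × Int)) :
    PySem.List.min? xs k = xs.foldl (pvStep k) none := by
  unfold PySem.List.min?
  congr 1
  funext a p
  cases a <;> rfl

-- A's guarded running-minimum step simulates min?'s first-minimum step over the filtered list.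
lemma pvSim (k : Int × Int → Int) (ps : List (Int × Int)) (acc : Option (Int × Int)) :
    ps.foldl (fun st p =>
        if k p != -1 && st.1.elim true (fun m => decide (k p < m)) then (some (k p), p) else st)
      (pvRepr k acc)
    = pvRepr k (ps.foldl (fun a p =>
        if (k p != -1) = true then pvStep k a p else a) acc) := by
  induction ps generalizing acc with
  | nil => rfl
  | cons p ps ih =>
    simp only [List.foldl_cons]
    rw [← ih]
    congr 1
    cases acc with
    | none =>
      by_cases h : k p = -1 <;> simp [pvRepr, pvStep, h]
    | some m =>
      by_cases h : k p = -1 <;> by_cases h2 : k p < k m <;>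
        simp [pvRepr, pvStep, h, h2]

lemma pvRepr_snd (k : Int × Int → Int) (o : Option (Int × Int)) :
    (pvRepr k o).2 = o.getD (-1, -1) := by
  cases o <;> rfl

-- first-minimum facts about Python's min (PySem.List.min?), used by both directions below
lemma pvMinCons {α : Type} (key : α → Int) (x : α) (t : List α) :
    PySem.List.min? (x :: t) key
      = match PySem.List.min? t key with
        | none => some x
        | some b => if key b < key x then some b else some x := by
  induction t generalizing x with
  | nil => simp [PySem.List.min?]
  | cons y t ih =>
    have h1 : PySem.List.min? (x :: y :: t) key
        = PySem.List.min? ((if key y < key x then y else x) :: t) key := by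
      simp only [PySem.List.min?, List.foldl_cons]
      split_ifs <;> rfl
    rw [h1, ih, ih]
    rcases hmt : PySem.List.min? t key with _ | b
    · by_cases hyx : key y < key x <;> simp [hyx]
    · by_cases hyx : key y < key x <;> by_cases hby : key b < key y <;>
        by_cases hbx : key b < key x <;>
        simp [hyx, hby, hbx] <;> first | omega | (exfalso; omega)

lemma pvMinConsStay {α : Type} (key : α → Int) (a : α) (t : List α)
    (h : ∀ y ∈ t, ¬ key y < key a) :
    PySem.List.min? (a :: t) key = some a := by
  rw [pvMinCons]
  rcases hmt : PySem.List.min? t key with _ | b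
  · rfl
  · have hb := PySem.List.min?_mem hmt
    simp [h b hb]

lemma pvMinConsSkip {α : Type} (key : α → Int) (a : α) (t : List α)
    (h : ∃ y ∈ t, key y < key a) :
    PySem.List.min? (a :: t) key = PySem.List.min? t key := by
  rw [pvMinCons]
  rcases hmt : PySem.List.min? t key with _ | b
  · rcases h with ⟨y, hy, _⟩
    rw [PySem.List.min?_eq_none_iff] at hmt
    simp [hmt] at hy
  · rcases h with ⟨y, hy, hlt⟩
    have := PySem.List.min?_isMin hmt y hy
    simp [show key b < key a by omega]

lemma pvMinAppend {α : Type} (key : α → Int) (xs ys : List α) :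
    PySem.List.min? (xs ++ ys) key
      = match PySem.List.min? xs key with
        | none => PySem.List.min? ys key
        | some a => PySem.List.min? (a :: ys) key := by
  rcases hmx : PySem.List.min? xs key with _ | a
  · rw [PySem.List.min?_eq_none_iff] at hmx; subst hmx; rfl
  · simp only [PySem.List.min?, List.foldl_append]
    rw [show xs.foldl _ none = some a from hmx]
    rfl

lemma pvMinSplit {α : Type} (key : α → Int) (xs : List α) (a : α)
    (h : PySem.List.min? xs key = some a) :
    ∃ pre suf, xs = pre ++ a :: suf ∧ (∀ y ∈ pre, key a < key y) ∧ (∀ y ∈ suf, key a ≤ key y) := by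
  induction xs generalizing a with
  | nil => simp [PySem.List.min?] at h
  | cons x t ih =>
    rw [pvMinCons] at h
    rcases hmt : PySem.List.min? t key with _ | b <;> rw [hmt] at h
    · simp only at h
      obtain rfl : x = a := by injection h
      rw [PySem.List.min?_eq_none_iff] at hmt; subst hmt
      exact ⟨[], [], rfl, by simp, by simp⟩
    · simp only at h
      by_cases hlt : key b < key x
      · rw [if_pos hlt] at h
        obtain rfl : b = a := by injection h
        obtain ⟨pre, suf, rfl, h1, h2⟩ := ih _ hmt
        exact ⟨x :: pre, suf, rfl, by
          intro y hy
          rcases List.mem_cons.1 hy with rfl | hy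
          · exact hlt
          · exact h1 y hy, h2⟩
      · rw [if_neg hlt] at h
        obtain rfl : x = a := by injection h
        refine ⟨[], t, rfl, by simp, ?_⟩
        intro y hy
        have := PySem.List.min?_isMin hmt y hy
        omega

lemma pvMinMap {α β : Type} (f : α → β) (key : β → Int) (l : List α) :
    PySem.List.min? (l.map f) key = (PySem.List.min? l (fun x => key (f x))).map f := by
  have aux : ∀ (l : List α) (acc : Option α),
      (l.map f).foldl (fun a x => match a with
        | none => some x
        | some m => if key x < key m then some x else some m) (acc.map f)
      = (l.foldl (fun a x => match a with
        | none => some x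
        | some m => if key (f x) < key (f m) then some x else some m) acc).map f := by
    intro l
    induction l with
    | nil => intro acc; rfl
    | cons x t ih =>
      intro acc
      rcases acc with _ | m
      · exact ih (some x)
      · simp only [List.map_cons, List.foldl_cons, Option.map_some]
        by_cases h : key (f x) < key (f m)
        · simpa [h] using ih (some x)
        · simpa [h] using ih (some m)
  exact aux l none

lemma pvMinKeyCongr {α : Type} (l : List α) (k1 k2 : α → Int)
    (h : ∀ x ∈ l, k1 x = k2 x) :
    PySem.List.min? l k1 = PySem.List.min? l k2 := by
  induction l with
  | nil => rfl
  | cons x t ih =>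
    rw [pvMinCons, pvMinCons, ih (fun y hy => h y (List.mem_cons_of_mem _ hy))]
    rcases hmt : PySem.List.min? t k2 with _ | b
    · rfl
    · have hb := PySem.List.min?_mem hmt
      simp only [hmt]
      rw [h x (List.mem_cons_self), h b (List.mem_cons_of_mem _ hb)]

lemma pvGetTake (row : List Int) (wN : Nat) (j : Int) (hj0 : 0 ≤ j) (hjw : j < (wN : Int)) :
    PySem.List.pyGetD (row.take wN) j 0 = PySem.List.pyGetD row j 0 := by
  lift j to ℕ using hj0
  have hjw' : j < wN := by exact_mod_cast hjw
  rw [PySem.List.pyGetD_natCast, PySem.List.pyGetD_natCast]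
  simp [List.getD, hjw']

def pvRowC (w i : Int) (row : List Int) : List ((Int × Int) × Int) :=
  ((PySem.List.enumerate (PySem.List.slice row none (some w)) 0).filter
      (fun q => q.2 != -1)).map (fun q => ((i, q.1), q.2))

lemma pvEnumSlice (row : List Int) (wN : Nat) (h : wN ≤ row.length) :
    PySem.List.enumerate (PySem.List.slice row none (some (wN : Int))) 0
      = (PySem.List.pyRange 0 (wN : Int) 1).map
          (fun j => (j, PySem.List.pyGetD row j 0)) := by
  rw [PySem.List.slice_to_natCast]
  have hlen : PySem.List.len (row.take wN) = (wN : Int) := by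
    simp [PySem.List.len, List.length_take]; omega
  rw [PySem.List.enumerate_eq_map_pyRange _ 0, hlen]
  apply List.map_congr_left
  intro j hj
  rw [PySem.List.mem_pyRange_one] at hj
  rw [pvGetTake row wN j hj.1 hj.2]

lemma pvRowC_eq (i : Int) (row : List Int) (wN : Nat) (h : wN ≤ row.length) :
    pvRowC (wN : Int) i row
      = ((PySem.List.pyRange 0 (wN : Int) 1).filter
           (fun j => PySem.List.pyGetD row j 0 != -1)).map
          (fun j => ((i, j), PySem.List.pyGetD row j 0)) := by
  unfold pvRowC
  rw [pvEnumSlice row wN h, List.filter_map, List.map_map]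
  rfl

lemma pvRowC_snd (w i : Int) (row : List Int) :
    (pvRowC w i row).map (fun e => e.2)
      = (PySem.List.slice row none (some w)).filter (fun v => v != -1) := by
  unfold pvRowC
  rw [List.map_map]
  conv_rhs => rw [← PySem.List.map_snd_enumerate (PySem.List.slice row none (some w)) 0,
    List.filter_map]
  rfl

lemma pvRowC_mem (w i : Int) (row : List Int) (e : (Int × Int) × Int)
    (he : e ∈ pvRowC w i row) :
    e.2 ≠ -1 ∧ e.1.1 = i ∧ ∃ kN : Nat, e.1.2 = (kN : Int) ∧
      ∃ hk : kN < (PySem.List.slice row none (some w)).length,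
        (PySem.List.slice row none (some w))[kN] = e.2 := by
  unfold pvRowC at he
  obtain ⟨q, hq, rfl⟩ := List.mem_map.1 he
  have hqf := List.of_mem_filter hq
  have hqe := List.mem_of_mem_filter hq
  rw [PySem.List.mem_enumerate_iff] at hqe
  obtain ⟨k, hk, rfl⟩ := hqe
  refine ⟨by simpa using hqf, rfl, k, by simp, hk, rfl⟩

lemma pvRowC_mem_val (w i m : Int) (row : List Int) (hm : m ≠ -1) :
    (m ∈ PySem.List.slice row none (some w)) ↔ ∃ e ∈ pvRowC w i row, e.2 = m := by
  constructor
  · intro hmem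
    obtain ⟨k, hk, hval⟩ := List.mem_iff_getElem.1 hmem
    refine ⟨((i, (k : Int)), m), ?_, rfl⟩
    unfold pvRowC
    apply List.mem_map.2
    refine ⟨((k : Int), m), ?_, rfl⟩
    apply List.mem_filter.2
    refine ⟨?_, by simpa using hm⟩
    rw [PySem.List.mem_enumerate_iff]
    exact ⟨k, hk, by simp [hval]⟩
  · rintro ⟨e, he, rfl⟩
    obtain ⟨-, -, k, -, hk, hval⟩ := pvRowC_mem w i row e he
    rw [← hval]
    exact List.getElem_mem hk

lemma pvRowIdx (w i : Int) (row : List Int) (a : (Int × Int) × Int)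
    (h : PySem.List.min? (pvRowC w i row) (fun e => e.2) = some a) :
    a.1.1 = i ∧ ∃ kN : Nat, a.1.2 = (kN : Int) ∧
      PySem.List.index? (PySem.List.slice row none (some w)) a.2 = some kN := by
  obtain ⟨hne, hfst, kA, hsnd, hkA, hval⟩ := pvRowC_mem w i row a (PySem.List.min?_mem h)
  refine ⟨hfst, kA, hsnd, ?_⟩
  have hpw : (pvRowC w i row).Pairwise (fun p q => p.1.2 < q.1.2) := by
    unfold pvRowC
    rw [List.pairwise_map]
    exact (PySem.List.pairwise_lt_enumerate _ 0).filter _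
  obtain ⟨pre, suf, hsplit, hpre, hsuf⟩ := pvMinSplit _ _ _ h
  rw [PySem.List.index?_eq_some_iff]
  refine ⟨(PySem.List.slice row none (some w)).take kA,
    (PySem.List.slice row none (some w)).drop (kA + 1), ?_,
    by simp [List.length_take]; omega, ?_⟩
  · conv_lhs => rw [← List.take_append_drop kA (PySem.List.slice row none (some w))]
    rw [List.drop_eq_getElem_cons hkA, hval]
  · -- a.2 does not occur before position kA in the slice
    intro hmem
    obtain ⟨j, hj, hjval⟩ := List.mem_iff_getElem.1 hmem
    have hjkA : j < kA := by
      have : ((PySem.List.slice row none (some w)).take kA).length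
          = min kA (PySem.List.slice row none (some w)).length := List.length_take ..
      omega
    have hjlen : j < (PySem.List.slice row none (some w)).length := by omega
    have hgj : (PySem.List.slice row none (some w))[j] = a.2 := by
      rw [← hjval]
      simp [List.getElem_take]
    -- the entry at j would be a valid pvRowC element occurring, by pairwise, before a
    have hein : ((i, (j : Int)), a.2) ∈ pvRowC w i row := by
      unfold pvRowC
      apply List.mem_map.2
      refine ⟨((j : Int), a.2), List.mem_filter.2 ⟨?_, by simpa using hne⟩, rfl⟩
      rw [PySem.List.mem_enumerate_iff]
      exact ⟨j, hjlen, by simp [hgj]⟩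
    rw [hsplit] at hein
    rcases List.mem_append.1 hein with hin | hin
    · -- in pre: its value would be strictly larger than a.2, but it equals a.2
      have := hpre _ hin
      simp at this
    · rcases List.mem_cons.1 hin with heq | hin
      · -- it would BE a: but the column indices differ
        have h12 := congrArg (fun p => p.1.2) heq
        simp only at h12
        omega
      · -- in suf: pairwise gives a.1.2 < j, but j < kA = a.1.2
        rw [hsplit] at hpw
        have hsegs := (List.pairwise_append.1 hpw).2.1
        have hlt := (List.pairwise_cons.1 hsegs).1 _ hin
        simp only at hlt
        omega

lemma pvFlat_ne (w : Int) (L : List (Int × List Int)) (e : (Int × Int) × Int)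
    (he : e ∈ L.flatMap (fun q => pvRowC w q.1 q.2)) : e.2 ≠ -1 := by
  obtain ⟨q, -, hq⟩ := List.mem_flatMap.1 he
  exact (pvRowC_mem w q.1 q.2 e hq).1

lemma pvLoc (w : Int) (L : List (Int × List Int)) (e0 : (Int × Int) × Int)
    (h : PySem.List.min? (L.flatMap (fun q => pvRowC w q.1 q.2)) (fun e => e.2) = some e0) :
    pvLocate w (some e0.2) L = e0.1 := by
  induction L with
  | nil => simp [PySem.List.min?] at h
  | cons q rest ih =>
    obtain ⟨i, row⟩ := q
    rw [List.flatMap_cons, pvMinAppend] at h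
    rcases hr : PySem.List.min? (pvRowC w i row) (fun e => e.2) with _ | a <;>
      simp only [hr] at h
    · -- this row has no valid entry: e0.2 is not in the slice
      have hne0 : e0.2 ≠ -1 := pvFlat_ne w rest e0 (PySem.List.min?_mem h)
      have hnot : ¬ e0.2 ∈ PySem.List.slice row none (some w) := by
        intro hmem
        rw [PySem.List.min?_eq_none_iff] at hr
        obtain ⟨e, he, -⟩ := (pvRowC_mem_val w i e0.2 row hne0).1 hmem
        simp [hr] at he
      simp only [pvLocate, if_neg hnot]
      exact ih h
    · by_cases hex : ∃ y ∈ rest.flatMap (fun q => pvRowC w q.1 q.2), y.2 < a.2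
      · rw [pvMinConsSkip (key := fun e : (Int × Int) × Int => e.2) _ _ hex] at h
        have hne0 : e0.2 ≠ -1 := pvFlat_ne w rest e0 (PySem.List.min?_mem h)
        have hnot : ¬ e0.2 ∈ PySem.List.slice row none (some w) := by
          intro hmem
          obtain ⟨e, he, hev⟩ := (pvRowC_mem_val w i e0.2 row hne0).1 hmem
          obtain ⟨y, hy, hlt⟩ := hex
          have h1 := PySem.List.min?_isMin hr e he
          have h2 := PySem.List.min?_isMin h y hy
          simp only at h1 h2
          omega
        simp only [pvLocate, if_neg hnot]
        exact ih h
      · push_neg at hex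
        rw [pvMinConsStay (key := fun e : (Int × Int) × Int => e.2) _ _
          (fun y hy => by have := hex y hy; simp only; omega)] at h
        obtain rfl : a = e0 := by injection h
        have hain := PySem.List.min?_mem hr
        have hne0 : a.2 ≠ -1 := (pvRowC_mem w i row _ hain).1
        obtain ⟨hfst, kN, hsnd, hidx⟩ := pvRowIdx w i row a hr
        have hmem : a.2 ∈ PySem.List.slice row none (some w) :=
          (pvRowC_mem_val w i a.2 row hne0).2 ⟨a, hain, rfl⟩
        simp only [pvLocate, if_pos hmem]
        rw [hidx]
        simp only [Option.getD_some]
        rw [Prod.ext_iff]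
        exact ⟨hfst.symm, hsnd.symm⟩

lemma pvLocate_none (w : Int) (L : List (Int × List Int)) :
    pvLocate w none L = (-1, -1) := by
  induction L with
  | nil => rfl
  | cons q rest ih => cases q; simpa [pvLocate] using ih

-- ===== VERDICT (by name: the statement is the Claim_ definition above) =====
theorem find_min_element_index_spec : Claim_equal_find_min_element_index := by
  unfold Claim_equal_find_min_element_index
  intro arr _ hpre
  unfold Spec_find_min_element_index find_min_element_index find_min_element_index_alt
  cases arr with
  | nil => decide
  | cons a0 l =>
    simp only [if_neg (List.cons_ne_nil a0 l)]
    set arr := a0 :: l with harr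
    set wN : Nat := (PySem.List.pyGetD arr 0 []).length with hwN
    set k : Int × Int → Int := fun p => PySem.List.pyGetD (PySem.List.pyGetD arr p.1 []) p.2 0 with hk
    set P : List (Int × Int) := (PySem.List.pyRange 0 (arr.length : Int) 1).flatMap
      (fun i => (PySem.List.pyRange 0 (wN : Int) 1).map (fun j => (i, j))) with hP
    -- rows referenced through pyGetD are members of arr
    have hrow : ∀ i ∈ PySem.List.pyRange 0 (arr.length : Int) 1,
        PySem.List.pyGetD arr i [] ∈ arr ∧ wN ≤ (PySem.List.pyGetD arr i []).length := by
      intro i hi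
      rw [PySem.List.mem_pyRange_one] at hi
      lift i to ℕ using hi.1
      have hlt : i < arr.length := by exact_mod_cast hi.2
      rw [PySem.List.pyGetD_natCast]
      have hmem : arr.getD i [] ∈ arr := by
        rw [List.getD_eq_getElem _ _ hlt]
        exact List.getElem_mem hlt
      exact ⟨hmem, hpre _ hmem⟩
    -- A's nested fold is a single fold over the row-major pair list P
    have hA : ((PySem.List.pyRange 0 (arr.length : Int) 1).foldl (fun st i =>
        (PySem.List.pyRange 0 (wN : Int) 1).foldl (fun st j =>
          let v := PySem.List.pyGetD (PySem.List.pyGetD arr i []) j 0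
          if v != -1 && st.1.elim true (fun m => decide (v < m)) then (some v, (i, j)) else st) st)
        ((none : Option Int), ((-1 : Int), (-1 : Int))))
      = P.foldl (fun st p =>
          if k p != -1 && st.1.elim true (fun m => decide (k p < m)) then (some (k p), p) else st)
        ((none : Option Int), ((-1 : Int), (-1 : Int))) := by
      rw [hP, List.foldl_flatMap]
      simp only [List.foldl_map]
      rfl
    rw [hA]
    have h2 : ((none : Option Int), ((-1 : Int), (-1 : Int))) = pvRepr k none := rfl
    rw [h2, pvSim k P none, pvRepr_snd]
    rw [PySem.List.foldl_if_eq_foldl_filter (fun p => k p != -1) (pvStep k), ← pvMinFold]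
    -- the valid-(pair, value) entries, row by row
    set CL : List ((Int × Int) × Int) := (PySem.List.pyRange 0 (arr.length : Int) 1).flatMap
      (fun i => pvRowC (wN : Int) i (PySem.List.pyGetD arr i [])) with hCL
    have hBridge : CL = (PySem.List.pyRange 0 (arr.length : Int) 1).flatMap
        (fun i => ((PySem.List.pyRange 0 (wN : Int) 1).filter
            (fun j => k (i, j) != -1)).map (fun j => ((i, j), k (i, j)))) := by
      rw [hCL]
      apply List.flatMap_congr
      intro i hi
      exact pvRowC_eq i _ wN (hrow i hi).2
    -- the valid pairs are the first components of CL
    have hfst : P.filter (fun p => k p != -1) = CL.map (fun e => e.1) := by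
      rw [hBridge, List.map_flatMap, hP, List.filter_flatMap]
      apply List.flatMap_congr
      intro i hi
      rw [List.map_map, List.filter_map]
      rfl
    -- B's value list is the second components of CL
    have hsnd : arr.flatMap (fun row =>
          (PySem.List.slice row none (some (wN : Int))).filter (fun v => v != -1))
        = CL.map (fun e => e.2) := by
      rw [hCL, List.map_flatMap]
      have harr' : arr = (PySem.List.pyRange 0 (arr.length : Int) 1).map
          (fun i => PySem.List.pyGetD arr i []) :=
        (PySem.List.map_pyGetD_pyRange_zero arr []).symm
      conv_lhs => rw [harr']
      rw [List.flatMap_map]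
      apply List.flatMap_congr
      intro i hi
      exact (pvRowC_snd (wN : Int) i _).symm
    -- keys agree on CL
    have hkeys : ∀ e ∈ CL, k e.1 = e.2 := by
      rw [hBridge]
      intro e he
      obtain ⟨i, -, he⟩ := List.mem_flatMap.1 he
      obtain ⟨j, -, rfl⟩ := List.mem_map.1 he
      rfl
    -- CL through enumerate, for pvLoc
    have henum : CL = (PySem.List.enumerate arr 0).flatMap
        (fun q => pvRowC (wN : Int) q.1 q.2) := by
      rw [PySem.List.enumerate_eq_map_pyRange arr ([] : List Int), List.flatMap_map, hCL]
      rfl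
    rw [hfst, hsnd]
    by_cases hnil : CL = []
    · rw [hnil]
      simp [PySem.List.min?, pvLocate_none]
    · -- CL is nonempty: it has a first minimal entry e0
      rcases he0 : PySem.List.min? CL (fun e => e.2) with _ | e0
      · rw [PySem.List.min?_eq_none_iff] at he0
        exact absurd he0 hnil
      -- A side computes e0.1
      have hAv : (PySem.List.min? (CL.map (fun e => e.1)) k).getD (-1, -1) = e0.1 := by
        rw [pvMinMap, pvMinKeyCongr CL _ _ hkeys, he0]
        rfl
      rw [hAv]
      -- B side: the value list is nonempty and its minimum is e0.2
      have hvne : ¬ CL.map (fun e => e.2) = [] := by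
        simpa using hnil
      rw [if_neg hvne]
      have hmv : PySem.List.min? (CL.map (fun e => e.2)) (fun v => v) = some e0.2 := by
        rw [pvMinMap, he0]
        rfl
      rw [hmv]
      exact (pvLoc (wN : Int) (PySem.List.enumerate arr 0) e0 (by rw [← henum, he0])).symm
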